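-- pv_equiv track=rewrite | github.com/greenstar1151/Baekjoon | 1417_국회의원 선거/1417_국회의원 선거_250813.py | solution
-- ===== SOURCE A (Python) =====
-- import heapq
--
-- def solution(votes: list[int]):
--     target = votes[0]
--     vote_sim = [-v for v in votes[1:]]
--     heapq.heapify(vote_sim)
--     action_count = 0
--     while vote_sim and True:
--         current_votes = -heapq.heappop(vote_sim)
--         if current_votes < target:
--             break
--
--         current_votes -= 1
--         target += 1
--         action_count += 1
--         heapq.heappush(vote_sim, -current_votes)
--
--     return action_count
-- ===== SOURCE B (Python) =====
-- def solution(votes: list[int]):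
--     # Binary search on the number k of stolen votes: k works iff the total
--     # surplus above the final target-1 is at most k.
--     v0 = votes[0]
--     others = votes[1:]
--     def feasible(k):
--         return sum(max(0, v - (v0 + k - 1)) for v in others) <= k
--     lo, hi = 0, max([0] + [v - v0 + 1 for v in others])
--     while lo < hi:
--         mid = (lo + hi) // 2
--         if feasible(mid):
--             hi = mid
--         else:
--             lo = mid + 1
--     return lo
-- ===== Notes on version B (the rewrite author's own statement) =====
-- stated objective: alternative
-- what changed: Replaces the heap-based one-steal-at-a-time greedy simulation (one heap pop/push per stolen vote) by a binary search on the number k of stolen votes, deciding each candidate k with the closed-form feasibility test sum(max(0, v-(v0+k-1))) <= k.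
-- outside the precondition, e.g. on solution([]): A raises IndexError, B raises IndexError
import Mathlib
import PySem

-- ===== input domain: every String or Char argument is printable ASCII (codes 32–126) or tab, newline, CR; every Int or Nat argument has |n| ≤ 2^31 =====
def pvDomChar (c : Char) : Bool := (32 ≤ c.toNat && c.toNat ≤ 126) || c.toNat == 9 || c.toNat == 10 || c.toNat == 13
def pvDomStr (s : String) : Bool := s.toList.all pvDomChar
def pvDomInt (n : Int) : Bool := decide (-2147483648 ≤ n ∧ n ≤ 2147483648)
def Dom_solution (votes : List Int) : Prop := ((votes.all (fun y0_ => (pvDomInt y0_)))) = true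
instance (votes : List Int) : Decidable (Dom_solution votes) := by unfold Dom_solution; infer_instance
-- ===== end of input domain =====

-- B replaces A's one-steal-at-a-time max-heap simulation by a binary search on the
-- number of stolen votes with a closed-form feasibility sum (alternative algorithm).

-- ===== PORT A =====
-- A's heapq heap of negated votes is modeled as a bag of the original votes:
-- heappop of the negated min returns exactly the first maximum (PySem.List.max?),
-- and the heap after pop holds the bag minus that occurrence (PySem.List.remove?);
-- only popped values and emptiness are ever observed, so this is value-exact.
def pvMeasure (t : Int) (sim : List Int) : Nat :=
  (sim.map (fun v => (v - t + 1).toNat)).sum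

theorem pvMeasure_dec (sim : List Int) (t m : Int) (hm : m ∈ sim)
    (hmax : ∀ v ∈ sim, v ≤ m) (ht : t ≤ m) :
    pvMeasure (t + 1) (sim.erase m ++ [m - 1]) < pvMeasure t sim := by
  have hp : sim.Perm (m :: sim.erase m) := List.perm_cons_erase hm
  have h1 : pvMeasure t sim = (m - t + 1).toNat + pvMeasure t (sim.erase m) := by
    unfold pvMeasure
    rw [(hp.map _).sum_eq]; simp
  have h2 : pvMeasure (t + 1) (sim.erase m ++ [m - 1])
      = pvMeasure (t + 1) (sim.erase m) + (m - 1 - (t + 1) + 1).toNat := by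
    unfold pvMeasure; simp
  have h3 : pvMeasure (t + 1) (sim.erase m) ≤ pvMeasure t (sim.erase m) := by
    unfold pvMeasure
    apply List.sum_le_sum
    intro v hv; omega
  omega

def solGo (sim : List Int) (target acc : Int) : Int :=
  match h : PySem.List.max? sim (fun v => v) with
  | none => acc
  | some m =>
    if hlt : m < target then acc
    else solGo ((PySem.List.remove? sim m).getD [] ++ [m - 1]) (target + 1) (acc + 1)
termination_by pvMeasure target sim
decreasing_by
  rw [PySem.List.remove?_eq_some_erase sim m (PySem.List.max?_mem h), Option.getD_some]
  exact pvMeasure_dec sim target m (PySem.List.max?_mem h)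
    (fun v hv => PySem.List.max?_isMax h v hv) (by omega)

def solution (votes : List Int) : Int :=
  match votes with
  | [] => 0          -- dead: Pre_solution excludes [] (A raises IndexError indexing the first element)
  | v0 :: rest => solGo rest v0 0

-- ===== PORT B =====
def needSum (others : List Int) (v0 k : Int) : Int :=
  (others.map (fun v => max 0 (v - (v0 + k - 1)))).sum

def bsGo (others : List Int) (v0 lo hi : Int) : Int :=
  if hlh : lo < hi then
    let mid := PySem.Int.floordiv (lo + hi) 2
    if needSum others v0 mid ≤ mid then bsGo others v0 lo mid
    else bsGo others v0 (mid + 1) hi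
  else lo
termination_by (hi - lo).toNat
decreasing_by
  · have h1 := (PySem.Int.floordiv_two_mid_bounds (le_of_lt hlh)).1
    have h2 : PySem.Int.floordiv (lo + hi) 2 < hi := by
      rw [PySem.Int.floordiv_lt_iff_lt_mul (by omega : (0:Int) < 2)]; omega
    omega
  · have h1 := (PySem.Int.floordiv_two_mid_bounds (le_of_lt hlh)).1
    have h2 : PySem.Int.floordiv (lo + hi) 2 < hi := by
      rw [PySem.Int.floordiv_lt_iff_lt_mul (by omega : (0:Int) < 2)]; omega
    omega

def solution_alt (votes : List Int) : Int :=
  match votes with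
  | [] => 0          -- dead: Pre_solution excludes []
  | v0 :: others =>
    let hi := (PySem.List.max? (0 :: others.map (fun v => v - v0 + 1)) (fun x => x)).getD 0
    bsGo others v0 0 hi

-- ===== PRECONDITION & SPEC =====
-- A indexes the first element and raises IndexError on the empty list; Pre_ excludes exactly that.
def Pre_solution (votes : List Int) : Prop := votes ≠ []
instance (votes : List Int) : Decidable (Pre_solution votes) := by unfold Pre_solution; infer_instance
def pvWitness_solution : List Int := [3, 5, 5]

def Spec_solution (votes : List Int) (out : Int) : Prop := out = solution_alt votes
instance (votes : List Int) (out : Int) : Decidable (Spec_solution votes out) := by unfold Spec_solution; infer_instance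

-- ===== CLAIM (what is proved, stated in full; the proofs are below) =====
def Claim_equal_solution : Prop := ∀ (votes : List Int), Dom_solution votes → Pre_solution votes → Spec_solution votes (solution votes)

-- ===== LEMMAS AND PROOFS =====

-- evaluation lemmas for the two recursive ports
theorem solGo_eval_none {sim : List Int} {t acc : Int}
    (h : PySem.List.max? sim (fun v => v) = none) : solGo sim t acc = acc := by
  rw [solGo]; split
  · rfl
  · simp_all

theorem solGo_eval_lt {sim : List Int} {t acc m : Int}
    (h : PySem.List.max? sim (fun v => v) = some m) (hlt : m < t) :
    solGo sim t acc = acc := by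
  rw [solGo]; split
  · rfl
  · rename_i m' heq
    rw [h] at heq
    injection heq with e
    subst e
    rw [dif_pos hlt]

theorem solGo_eval_ge {sim : List Int} {t acc m : Int}
    (h : PySem.List.max? sim (fun v => v) = some m) (hge : ¬ m < t) :
    solGo sim t acc
      = solGo ((PySem.List.remove? sim m).getD [] ++ [m - 1]) (t + 1) (acc + 1) := by
  rw [solGo]; split
  · simp_all
  · rename_i m' heq
    rw [h] at heq
    injection heq with e
    subst e
    rw [dif_neg hge]

theorem bsGo_eval_stop {others : List Int} {v0 lo hi : Int} (h : ¬ lo < hi) :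
    bsGo others v0 lo hi = lo := by
  rw [bsGo]; rw [dif_neg h]

theorem bsGo_eval_step {others : List Int} {v0 lo hi : Int} (h : lo < hi) :
    bsGo others v0 lo hi
      = if needSum others v0 (PySem.Int.floordiv (lo + hi) 2)
            ≤ PySem.Int.floordiv (lo + hi) 2
        then bsGo others v0 lo (PySem.Int.floordiv (lo + hi) 2)
        else bsGo others v0 (PySem.Int.floordiv (lo + hi) 2 + 1) hi := by
  rw [bsGo]; rw [dif_pos h]

-- "k stolen votes suffice" for candidate total v0, opponents `others`
def Feasible (others : List Int) (v0 k : Int) : Prop := needSum others v0 k ≤ k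

-- k is the least feasible count
def Least (others : List Int) (v0 k : Int) : Prop :=
  0 ≤ k ∧ Feasible others v0 k ∧ ∀ j, 0 ≤ j → Feasible others v0 j → k ≤ j

theorem needSum_nonneg (l : List Int) (v0 k : Int) : 0 ≤ needSum l v0 k := by
  apply List.sum_nonneg
  intro x hx
  obtain ⟨v, _, rfl⟩ := List.mem_map.mp hx
  exact le_max_left _ _

theorem needSum_mono {l : List Int} {v0 k k' : Int} (h : k ≤ k') :
    needSum l v0 k' ≤ needSum l v0 k := by
  apply List.sum_le_sum
  intro v hv
  exact max_le_max le_rfl (by omega)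

theorem feasible_mono {l : List Int} {v0 k k' : Int} (hk : k ≤ k')
    (h : Feasible l v0 k) : Feasible l v0 k' := by
  have := needSum_mono (l := l) (v0 := v0) hk
  unfold Feasible at *
  omega

theorem needSum_eq_zero {l : List Int} {v0 k : Int} (h : ∀ v ∈ l, v ≤ v0 + k - 1) :
    needSum l v0 k = 0 := by
  apply List.sum_eq_zero
  intro x hx
  obtain ⟨v, hv, rfl⟩ := List.mem_map.mp hx
  exact max_eq_left (by have := h v hv; omega)

theorem needSum_perm {l l' : List Int} (h : l.Perm l') (v0 k : Int) :
    needSum l v0 k = needSum l' v0 k := by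
  exact (h.map _).sum_eq

theorem needSum_shift (l : List Int) (v0 k : Int) :
    needSum l (v0 + 1) k = needSum l v0 (k + 1) := by
  unfold needSum
  congr 1
  apply List.map_congr_left
  intro v _
  have : v0 + 1 + k - 1 = v0 + (k + 1) - 1 := by ring
  rw [this]

-- key step: one greedy steal shifts the least count by exactly one
theorem feasible_step {sim : List Int} {t m k : Int} (hm : m ∈ sim)
    (hmax : ∀ v ∈ sim, v ≤ m) (ht : t ≤ m) (hk : 0 ≤ k) :
    (Feasible sim t (k + 1) ↔ Feasible (sim.erase m ++ [m - 1]) (t + 1) k) := by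
  have hp : sim.Perm (m :: sim.erase m) := List.perm_cons_erase hm
  have e1 : needSum sim t (k + 1)
      = max 0 (m - (t + (k + 1) - 1)) + needSum (sim.erase m) t (k + 1) := by
    rw [needSum_perm hp]; simp [needSum]
  have e2 : needSum (sim.erase m ++ [m - 1]) (t + 1) k
      = needSum (sim.erase m) (t + 1) k + max 0 (m - 1 - (t + 1 + k - 1)) := by
    simp [needSum]
  have e3 : needSum (sim.erase m) (t + 1) k = needSum (sim.erase m) t (k + 1) :=
    needSum_shift _ _ _
  unfold Feasible
  rw [e1, e2, e3]
  by_cases hc : m ≤ t + k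
  · have hz : needSum (sim.erase m) t (k + 1) = 0 := by
      apply needSum_eq_zero
      intro v hv
      have := hmax v (List.mem_of_mem_erase hv)
      omega
    have m1 : max 0 (m - (t + (k + 1) - 1)) = 0 := max_eq_left (by omega)
    have m2 : max 0 (m - 1 - (t + 1 + k - 1)) = 0 := max_eq_left (by omega)
    rw [hz, m1, m2]
    constructor <;> intro <;> omega
  · have m1 : max 0 (m - (t + (k + 1) - 1)) = m - (t + (k + 1) - 1) :=
      max_eq_right (by omega)
    have m2 : max 0 (m - 1 - (t + 1 + k - 1)) = m - 1 - (t + 1 + k - 1) :=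
      max_eq_right (by omega)
    rw [m1, m2]
    constructor <;> intro <;> omega

theorem solGo_eq (n : Nat) : ∀ (sim : List Int) (t : Int), pvMeasure t sim = n →
    ∀ (acc k : Int), Least sim t k → solGo sim t acc = acc + k := by
  induction n using Nat.strong_induction_on with
  | _ n ih =>
    intro sim t hmeas acc k hL
    rcases hmax : PySem.List.max? sim (fun v => v) with _ | m
    · -- empty heap
      have hsim : sim = [] := (PySem.List.max?_eq_none_iff _ _).mp hmax
      subst hsim
      have hf0 : Feasible [] t 0 := by simp [Feasible, needSum]
      have hk : k = 0 := le_antisymm (hL.2.2 0 le_rfl hf0) hL.1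
      rw [solGo_eval_none hmax, hk]; ring
    · have hmem : m ∈ sim := PySem.List.max?_mem hmax
      have hall : ∀ v ∈ sim, v ≤ m := fun v hv => PySem.List.max?_isMax hmax v hv
      by_cases hlt : m < t
      · -- leader already strictly ahead
        have hf0 : Feasible sim t 0 := by
          unfold Feasible
          rw [needSum_eq_zero (fun v hv => by have := hall v hv; omega)]
        have hk : k = 0 := le_antisymm (hL.2.2 0 le_rfl hf0) hL.1
        rw [solGo_eval_lt hmax hlt, hk]; ring
      · -- one steal, recurse
        have ht : t ≤ m := by omega
        have hpos : ¬ Feasible sim t 0 := by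
          unfold Feasible
          have e1 : needSum sim t 0
              = max 0 (m - (t + 0 - 1)) + needSum (sim.erase m) t 0 := by
            rw [needSum_perm (List.perm_cons_erase hmem)]; simp [needSum]
          have := needSum_nonneg (sim.erase m) t 0
          have hm1 : (0:Int) < max 0 (m - (t + 0 - 1)) :=
            lt_max_of_lt_right (by omega)
          omega
        have hk0 := hL.1
        have hk1 : 1 ≤ k := by
          rcases lt_or_ge k 1 with h1 | h1
          · have : k = 0 := by omega
            exact absurd (this ▸ hL.2.1) hpos
          · exact h1
        have hL' : Least (sim.erase m ++ [m - 1]) (t + 1) (k - 1) := by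
          refine ⟨by omega, ?_, ?_⟩
          · have := (feasible_step hmem hall ht (by omega : (0:Int) ≤ k - 1)).mp
              (by have : k - 1 + 1 = k := by ring
                  rw [this]; exact hL.2.1)
            exact this
          · intro j hj hf
            have := hL.2.2 (j + 1) (by omega)
              ((feasible_step hmem hall ht hj).mpr hf)
            omega
        have hdec : pvMeasure (t + 1) (sim.erase m ++ [m - 1]) < n := by
          rw [← hmeas]
          exact pvMeasure_dec sim t m hmem hall ht
        have hrec := ih _ hdec (sim.erase m ++ [m - 1]) (t + 1) rfl (acc + 1) (k - 1) hL'
        rw [solGo_eval_ge hmax hlt]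
        rw [PySem.List.remove?_eq_some_erase sim m hmem, Option.getD_some]
        rw [hrec]
        ring

theorem bsGo_least (n : Nat) : ∀ (others : List Int) (v0 lo hi : Int), (hi - lo).toNat = n →
    0 ≤ lo → lo ≤ hi → Feasible others v0 hi →
    (∀ j, 0 ≤ j → j < lo → ¬ Feasible others v0 j) →
    Least others v0 (bsGo others v0 lo hi) := by
  induction n using Nat.strong_induction_on with
  | _ n ih =>
    intro others v0 lo hi hmeas hlo hlh hfhi hlow
    by_cases h : lo < hi
    · have hmid1 : lo ≤ PySem.Int.floordiv (lo + hi) 2 :=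
        (PySem.Int.floordiv_two_mid_bounds (le_of_lt h)).1
      have hmid2 : PySem.Int.floordiv (lo + hi) 2 < hi := by
        rw [PySem.Int.floordiv_lt_iff_lt_mul (by omega : (0:Int) < 2)]; omega
      set mid := PySem.Int.floordiv (lo + hi) 2 with hmiddef
      by_cases hf : needSum others v0 mid ≤ mid
      · have : bsGo others v0 lo hi = bsGo others v0 lo mid := by
          rw [bsGo_eval_step h, ← hmiddef, if_pos hf]
        rw [this]
        exact ih (mid - lo).toNat (by omega) others v0 lo mid rfl hlo (by omega) hf hlow
      · have : bsGo others v0 lo hi = bsGo others v0 (mid + 1) hi := by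
          rw [bsGo_eval_step h, ← hmiddef, if_neg hf]
        rw [this]
        refine ih (hi - (mid + 1)).toNat (by omega) others v0 (mid + 1) hi rfl
          (by omega) (by omega) hfhi ?_
        intro j hj hjm hfj
        rcases lt_or_ge j lo with hc | hc
        · exact hlow j hj hc hfj
        · exact hf (feasible_mono (by omega) hfj)
    · have heq : lo = hi := by omega
      rw [bsGo_eval_stop h]
      refine ⟨hlo, heq ▸ hfhi, ?_⟩
      intro j hj hfj
      by_contra hcon
      exact hlow j hj (by omega) hfj

theorem alt_least (v0 : Int) (others : List Int) :
    Least others v0 (solution_alt (v0 :: others)) := by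
  have hmax : PySem.List.max? (0 :: others.map (fun v => v - v0 + 1)) (fun x => x)
      = some ((others.map (fun v => v - v0 + 1)).foldl max 0) :=
    PySem.List.max?_id_cons 0 _
  have hub := PySem.List.max?_isMax hmax
  set H := (others.map (fun v => v - v0 + 1)).foldl max 0 with hH
  have hH0 : 0 ≤ H := hub 0 (by simp)
  have hHv : ∀ v ∈ others, v - v0 + 1 ≤ H := by
    intro v hv
    exact hub (v - v0 + 1) (by simp only [List.mem_cons]; exact Or.inr (List.mem_map.mpr ⟨v, hv, rfl⟩))
  have halt : solution_alt (v0 :: others) = bsGo others v0 0 H := by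
    simp [solution_alt, hmax]
  rw [halt]
  apply bsGo_least (H - 0).toNat others v0 0 H rfl le_rfl hH0
  · unfold Feasible
    rw [needSum_eq_zero (fun v hv => by have := hHv v hv; omega)]
    omega
  · intro j hj hjlt _
    omega

-- ===== VERDICT (by name: the statement is the Claim_ definition above) =====
theorem solution_spec : Claim_equal_solution := by
  intro votes _ hpre
  match votes with
  | [] => exact absurd rfl hpre
  | v0 :: rest =>
    show solution (v0 :: rest) = solution_alt (v0 :: rest)
    have h := alt_least v0 rest
    simpa [solution] using solGo_eq (pvMeasure v0 rest) rest v0 rfl 0 _ h
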